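-- pv_equiv track=rewrite | github.com/DopTrack/estimate | estimation_functions/observations_data.py | get_all_passes_times
-- ===== SOURCE A (Python) =====
-- def get_all_passes_times(real_passes_start_times, real_passes_end_times, simulated_passes_start_times, simulated_passes_end_times):
--     passes_start_times = []
--     passes_end_times = []
--
--     for k in real_passes_start_times:
--         passes_start_times = passes_start_times + real_passes_start_times[k]
--         passes_end_times = passes_end_times + real_passes_end_times[k]
--     for k in simulated_passes_start_times:
--         passes_start_times = passes_start_times + simulated_passes_start_times[k]
--         passes_end_times = passes_end_times + simulated_passes_end_times[k]
--
--     ind = sorted(range(len(passes_start_times)), key=passes_start_times.__getitem__)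
--
--     passes_start_times = [passes_start_times[i] for i in ind]
--     passes_end_times = [passes_end_times[i] for i in ind]
--
--     return passes_start_times, passes_end_times
-- ===== SOURCE B (Python) =====
-- def get_all_passes_times(real_passes_start_times, real_passes_end_times, simulated_passes_start_times, simulated_passes_end_times):
--     starts = [t for k in real_passes_start_times for t in real_passes_start_times[k]] \
--            + [t for k in simulated_passes_start_times for t in simulated_passes_start_times[k]]
--     ends = [t for k in real_passes_start_times for t in real_passes_end_times[k]] \
--          + [t for k in simulated_passes_start_times for t in simulated_passes_end_times[k]]
--     # group-by: bucket the end times under their start time, then walk the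
--     # sorted distinct start keys; appending preserves A's stable tie order
--     buckets = {}
--     for s, e in zip(starts, ends):
--         buckets.setdefault(s, []).append(e)
--     out_starts = []
--     out_ends = []
--     for s in sorted(buckets):
--         grp = buckets[s]
--         out_starts += [s] * len(grp)
--         out_ends += grp
--     return out_starts, out_ends
-- ===== Notes on version B (the rewrite author's own statement) =====
-- stated objective: alternative
-- what changed: B replaces A's argsort of all indices plus two index-gather passes with a group-by: it buckets each end time under its start time in a dict, sorts only the distinct start keys, and emits each bucket (replicated key + grouped ends) in key order, which preserves the stable tie order by appending.
import Mathlib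
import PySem

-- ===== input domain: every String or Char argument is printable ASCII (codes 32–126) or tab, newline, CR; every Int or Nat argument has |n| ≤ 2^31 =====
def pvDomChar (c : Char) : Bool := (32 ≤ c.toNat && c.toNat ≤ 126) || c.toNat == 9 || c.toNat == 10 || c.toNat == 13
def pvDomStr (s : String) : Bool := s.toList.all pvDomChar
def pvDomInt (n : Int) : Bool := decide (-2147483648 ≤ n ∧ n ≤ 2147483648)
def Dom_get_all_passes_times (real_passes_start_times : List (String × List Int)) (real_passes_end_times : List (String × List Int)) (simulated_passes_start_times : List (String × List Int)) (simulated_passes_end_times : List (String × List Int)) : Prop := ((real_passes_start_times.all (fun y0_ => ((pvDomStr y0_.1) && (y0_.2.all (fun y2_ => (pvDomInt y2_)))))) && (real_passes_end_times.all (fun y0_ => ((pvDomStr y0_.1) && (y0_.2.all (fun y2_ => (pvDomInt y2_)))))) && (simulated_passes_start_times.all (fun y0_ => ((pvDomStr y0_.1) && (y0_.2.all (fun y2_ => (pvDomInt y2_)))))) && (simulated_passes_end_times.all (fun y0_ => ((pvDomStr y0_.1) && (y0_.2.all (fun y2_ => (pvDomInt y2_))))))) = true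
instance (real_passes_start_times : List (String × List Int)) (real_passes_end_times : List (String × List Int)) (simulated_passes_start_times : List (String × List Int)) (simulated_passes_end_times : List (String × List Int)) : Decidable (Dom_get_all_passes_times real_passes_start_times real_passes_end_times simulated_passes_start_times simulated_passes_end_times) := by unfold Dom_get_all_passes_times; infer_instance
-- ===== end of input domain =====

-- B replaces A's argsort-then-gather with a group-by dict keyed by start time, sorting only the
-- distinct start keys (objective: alternative).
-- ===== PORT A =====
def get_all_passes_times (real_passes_start_times : List (String × List Int)) (real_passes_end_times : List (String × List Int)) (simulated_passes_start_times : List (String × List Int)) (simulated_passes_end_times : List (String × List Int)) : List Int × List Int :=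
  let rs := PySem.Dict.ofList real_passes_start_times
  let re := PySem.Dict.ofList real_passes_end_times
  let ss := PySem.Dict.ofList simulated_passes_start_times
  let se := PySem.Dict.ofList simulated_passes_end_times
  -- for k in real_passes_start_times: …  (pyGetD-style total lookup; Pre_ excludes the KeyError inputs)
  let st1 := rs.keys.foldl (fun (p : List Int × List Int) k => (p.1 ++ rs.getD k [], p.2 ++ re.getD k [])) ([], [])
  -- for k in simulated_passes_start_times: …
  let st2 := ss.keys.foldl (fun (p : List Int × List Int) k => (p.1 ++ ss.getD k [], p.2 ++ se.getD k [])) st1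
  let passes_start_times := st2.1
  let passes_end_times := st2.2
  -- ind = sorted(range(len(passes_start_times)), key=passes_start_times.__getitem__)
  let ind := PySem.List.sorted (PySem.List.pyRange 0 (PySem.List.len passes_start_times) 1) (fun i => PySem.List.pyGetD passes_start_times i 0) false
  -- the two gathering comprehensions (pyGetD total: Pre_ excludes the IndexError inputs on the end list)
  (ind.map (fun i => PySem.List.pyGetD passes_start_times i 0),
   ind.map (fun i => PySem.List.pyGetD passes_end_times i 0))

-- ===== PORT B =====
def get_all_passes_times_alt (real_passes_start_times : List (String × List Int)) (real_passes_end_times : List (String × List Int)) (simulated_passes_start_times : List (String × List Int)) (simulated_passes_end_times : List (String × List Int)) : List Int × List Int :=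
  let rs := PySem.Dict.ofList real_passes_start_times
  let re := PySem.Dict.ofList real_passes_end_times
  let ss := PySem.Dict.ofList simulated_passes_start_times
  let se := PySem.Dict.ofList simulated_passes_end_times
  -- starts = [t for k in rs for t in rs[k]] + [t for k in ss for t in ss[k]]
  let starts := rs.keys.flatMap (fun k => rs.getD k []) ++ ss.keys.flatMap (fun k => ss.getD k [])
  -- ends = [t for k in rs for t in re[k]] + [t for k in ss for t in se[k]]
  let ends := rs.keys.flatMap (fun k => re.getD k []) ++ ss.keys.flatMap (fun k => se.getD k [])
  -- for s, e in zip(starts, ends): buckets.setdefault(s, []).append(e)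
  let buckets := (starts.zip ends).foldl (fun d p => d.modify p.1 [] (fun l => l ++ [p.2])) PySem.Dict.empty
  -- for s in sorted(buckets): out_starts += [s] * len(grp); out_ends += grp
  let sortedKeys := PySem.List.sorted buckets.keys (fun s => s) false
  sortedKeys.foldl
    (fun (acc : List Int × List Int) s =>
      let grp := buckets.getD s []
      (acc.1 ++ List.replicate grp.length s, acc.2 ++ grp))
    ([], [])

-- ===== PRECONDITION & SPEC =====
-- Pre_ excludes exactly the inputs on which the Python A raises: a key of the real (resp. simulated)
-- start dict missing from the matching end dict (KeyError), or the merged end list shorter than the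
-- merged start list (IndexError in the final gathering comprehension). A returns on every other input.
def Pre_get_all_passes_times (real_passes_start_times : List (String × List Int)) (real_passes_end_times : List (String × List Int)) (simulated_passes_start_times : List (String × List Int)) (simulated_passes_end_times : List (String × List Int)) : Prop :=
  let rs := PySem.Dict.ofList real_passes_start_times
  let re := PySem.Dict.ofList real_passes_end_times
  let ss := PySem.Dict.ofList simulated_passes_start_times
  let se := PySem.Dict.ofList simulated_passes_end_times
  (∀ k ∈ rs.keys, re.contains k = true) ∧ (∀ k ∈ ss.keys, se.contains k = true) ∧
  ((rs.keys.map (fun k => (rs.getD k []).length)).sum + (ss.keys.map (fun k => (ss.getD k []).length)).sum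
    ≤ (rs.keys.map (fun k => (re.getD k []).length)).sum + (ss.keys.map (fun k => (se.getD k []).length)).sum)
instance (real_passes_start_times : List (String × List Int)) (real_passes_end_times : List (String × List Int)) (simulated_passes_start_times : List (String × List Int)) (simulated_passes_end_times : List (String × List Int)) : Decidable (Pre_get_all_passes_times real_passes_start_times real_passes_end_times simulated_passes_start_times simulated_passes_end_times) := by unfold Pre_get_all_passes_times; infer_instance

def pvWitness_get_all_passes_times : (List (String × List Int)) × (List (String × List Int)) × (List (String × List Int)) × (List (String × List Int)) :=
  ([("a", [3, 1])], [("a", [5, 6])], [("b", [2])], [("b", [4])])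

def Spec_get_all_passes_times (real_passes_start_times : List (String × List Int)) (real_passes_end_times : List (String × List Int)) (simulated_passes_start_times : List (String × List Int)) (simulated_passes_end_times : List (String × List Int)) (out : List Int × List Int) : Prop := out = get_all_passes_times_alt real_passes_start_times real_passes_end_times simulated_passes_start_times simulated_passes_end_times
instance (real_passes_start_times : List (String × List Int)) (real_passes_end_times : List (String × List Int)) (simulated_passes_start_times : List (String × List Int)) (simulated_passes_end_times : List (String × List Int)) (out : List Int × List Int) : Decidable (Spec_get_all_passes_times real_passes_start_times real_passes_end_times simulated_passes_start_times simulated_passes_end_times out) := by unfold Spec_get_all_passes_times; infer_instance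

-- ===== CLAIM (what is proved, stated in full; the proofs are below) =====
def Claim_equal_get_all_passes_times : Prop := ∀ (real_passes_start_times : List (String × List Int)) (real_passes_end_times : List (String × List Int)) (simulated_passes_start_times : List (String × List Int)) (simulated_passes_end_times : List (String × List Int)), Dom_get_all_passes_times real_passes_start_times real_passes_end_times simulated_passes_start_times simulated_passes_end_times → Pre_get_all_passes_times real_passes_start_times real_passes_end_times simulated_passes_start_times simulated_passes_end_times → Spec_get_all_passes_times real_passes_start_times real_passes_end_times simulated_passes_start_times simulated_passes_end_times (get_all_passes_times real_passes_start_times real_passes_end_times simulated_passes_start_times simulated_passes_end_times)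

-- ===== LEMMAS AND PROOFS =====

-- insertion into a mapped list = mapped insertion, when the order predicate factors through the map
theorem pv_insertBy_map {α β : Type} (g : α → β) (before : β → β → Bool) (x : α) (ys : List α) :
    PySem.List.insertBy before (g x) (ys.map g)
      = (PySem.List.insertBy (fun a b => before (g a) (g b)) x ys).map g := by
  induction ys with
  | nil => simp [PySem.List.insertBy]
  | cons y ys ih =>
      simp only [List.map_cons, PySem.List.insertBy]
      by_cases h : before (g x) (g y)
      · simp [h]
      · simp [h, ih]

theorem pv_foldl_insertBy_map {α β : Type} (g : α → β) (before : β → β → Bool) (xs acc : List α) :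
    (xs.map g).foldl (fun acc b => PySem.List.insertBy before b acc) (acc.map g)
      = (xs.foldl (fun acc a => PySem.List.insertBy (fun a b => before (g a) (g b)) a acc) acc).map g := by
  induction xs generalizing acc with
  | nil => rfl
  | cons x xs ih =>
      simp only [List.map_cons, List.foldl_cons]
      rw [pv_insertBy_map, ih]

-- sorting a mapped list by a key = mapping the list sorted by the composed key (stability preserved)
theorem pv_sorted_map {α β κ : Type} [LT κ] [DecidableLT κ] (g : α → β) (key : β → κ) (xs : List α) :
    PySem.List.sorted (xs.map g) key false
      = (PySem.List.sorted xs (fun a => key (g a)) false).map g := by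
  rw [PySem.List.sorted_eq_foldl_insertBy, PySem.List.sorted_eq_foldl_insertBy]
  exact pv_foldl_insertBy_map g (fun a b => decide (key a < key b)) xs []

-- zip(starts, ends) is the index comprehension over range(len(starts)) when ends is long enough
theorem pv_range_map_zip (starts ends : List Int) (h : starts.length ≤ ends.length) :
    (PySem.List.pyRange 0 (PySem.List.len starts) 1).map
        (fun i => (PySem.List.pyGetD starts i 0, PySem.List.pyGetD ends i 0))
      = starts.zip ends := by
  have hlen : ((PySem.List.pyRange 0 (PySem.List.len starts) 1).map
      (fun i => (PySem.List.pyGetD starts i 0, PySem.List.pyGetD ends i 0))).length = starts.length := by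
    have := congrArg List.length (PySem.List.map_pyGetD_pyRange_zero starts 0)
    simp only [List.length_map] at this ⊢
    exact this
  apply List.ext_getElem?
  intro k
  by_cases hk : k < starts.length
  · have h1 : ((PySem.List.pyRange 0 (PySem.List.len starts) 1).map
        (fun i => (PySem.List.pyGetD starts i 0, PySem.List.pyGetD ends i 0)))[k]?
        = some (PySem.List.pyGetD starts (k : Int) 0, PySem.List.pyGetD ends (k : Int) 0) := by
      rw [PySem.List.len_eq]
      exact PySem.List.getElem?_map_pyRange_zero _ _ _ hk
    have hk2 : k < ends.length := lt_of_lt_of_le hk h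
    have hkz : k < (starts.zip ends).length := by
      simp only [List.length_zip]; omega
    rw [h1, List.getElem?_eq_getElem hkz]
    simp [List.getElem_zip, PySem.List.pyGetD_natCast, List.getD_eq_getElem?_getD,
      List.getElem?_eq_getElem hk, List.getElem?_eq_getElem hk2]
  · rw [List.getElem?_eq_none, List.getElem?_eq_none]
    · simp only [List.length_zip]; omega
    · omega

-- insertBy skips a prefix it must not go before
theorem pv_insertBy_append {α : Type} (before : α → α → Bool) (x : α) (l r : List α)
    (h : ∀ y ∈ l, before x y = false) :
    PySem.List.insertBy before x (l ++ r) = l ++ PySem.List.insertBy before x r := by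
  induction l with
  | nil => rfl
  | cons y l ih =>
      simp only [List.cons_append, PySem.List.insertBy, h y (by simp), Bool.false_eq_true,
        if_false, List.cons.injEq, true_and]
      exact ih (fun z hz => h z (by simp [hz]))

-- insertBy prepends when it goes before everything
theorem pv_insertBy_all_before {α : Type} (before : α → α → Bool) (x : α) (l : List α)
    (h : ∀ y ∈ l, before x y = true) :
    PySem.List.insertBy before x l = x :: l := by
  cases l with
  | nil => rfl
  | cons y l => simp [PySem.List.insertBy, h y (by simp)]

-- inserting a pair into a flatMap of key-homogeneous blocks over strictly increasing keys
-- appends it to the end of its own key's block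
theorem pv_insertBy_flatMap (ks : List Int) (f : Int → List (Int × Int)) (p : Int × Int)
    (hsorted : ks.Pairwise (· < ·))
    (hblocks : ∀ s ∈ ks, ∀ q ∈ f s, q.1 = s)
    (hmem : p.1 ∈ ks) :
    PySem.List.insertBy (fun a b => decide (a.1 < b.1)) p (ks.flatMap f)
      = ks.flatMap (fun s => if s = p.1 then f s ++ [p] else f s) := by
  induction ks with
  | nil => cases hmem
  | cons s ks ih =>
      simp only [List.flatMap_cons]
      by_cases hs : s = p.1
      · -- skip the block of key s = p.1, then prepend to the (strictly larger) rest
        rw [pv_insertBy_append _ _ _ _ (fun y hy => by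
          have h1 : y.1 = s := hblocks s (by simp) y hy
          simp [h1, hs])]
        rw [pv_insertBy_all_before _ _ _ (fun y hy => by
          obtain ⟨t, ht, hyt⟩ := List.mem_flatMap.mp hy
          have h1 : y.1 = t := hblocks t (by simp [ht]) y hyt
          have h2 : s < t := (List.pairwise_cons.mp hsorted).1 t ht
          simp [h1]; omega)]
        have hrest : (ks.flatMap fun t => if t = p.1 then f t ++ [p] else f t) = ks.flatMap f := by
          simp only [List.flatMap_def]
          congr 1
          apply List.map_congr_left
          intro t ht
          have h2 : s < t := (List.pairwise_cons.mp hsorted).1 t ht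
          have : t ≠ p.1 := by omega
          simp [this]
        simp [hs, hrest]
      · have hmem' : p.1 ∈ ks := by
          rcases List.mem_cons.mp hmem with h | h
          · exact absurd h.symm hs
          · exact h
        rw [pv_insertBy_append _ _ _ _ (fun y hy => by
          have h1 : y.1 = s := hblocks s (by simp) y hy
          have h2 : s < p.1 := by
            rcases (List.pairwise_cons.mp hsorted) with ⟨hlt, _⟩
            exact hlt p.1 hmem'
          simp [h1]; omega)]
        rw [ih (List.pairwise_cons.mp hsorted).2
              (fun t ht q hq => hblocks t (by simp [ht]) q hq) hmem']
        simp only [if_neg hs]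

-- stable sort by the first component = sorted distinct keys, each key's block kept in input order
theorem pv_sorted_eq_flatMap (xs : List (Int × Int)) (ks : List Int)
    (hsorted : ks.Pairwise (· < ·)) (hmem : ∀ p ∈ xs, p.1 ∈ ks) :
    PySem.List.sorted xs (fun p => p.1) false
      = ks.flatMap (fun s => xs.filter (fun p => p.1 == s)) := by
  induction xs using List.reverseRecOn with
  | nil => simp [PySem.List.sorted_eq_foldl_insertBy]
  | append_singleton xs p ih =>
      rw [PySem.List.sorted_eq_foldl_insertBy, List.foldl_append, List.foldl_cons, List.foldl_nil,
        ← PySem.List.sorted_eq_foldl_insertBy,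
        ih (fun q hq => hmem q (by simp [hq])),
        pv_insertBy_flatMap ks _ p hsorted
          (fun s _ q hq => by
            have := List.mem_filter.mp hq
            exact eq_of_beq this.2)
          (hmem p (by simp))]
      simp only [List.flatMap_def]
      congr 1
      apply List.map_congr_left
      intro t _
      by_cases ht : t = p.1
      · subst ht
        simp [List.filter_append]
      · have hf : (p.1 == t) = false := by
          simp only [beq_eq_false_iff_ne, ne_eq]
          exact fun h => ht h.symm
        simp [List.filter_append, hf, ht]

-- the first components of one key's block are that key, repeated once per block element
theorem pv_filter_map_fst_eq_replicate (xs : List (Int × Int)) (s : Int) :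
    (xs.filter (fun p => p.1 == s)).map (fun p => p.1)
      = List.replicate ((xs.filter (fun p => p.1 == s)).map (fun p => p.2)).length s := by
  rw [List.eq_replicate_iff]
  constructor
  · simp
  · intro b hb
    obtain ⟨q, hq, hqb⟩ := List.mem_map.mp hb
    have := List.mem_filter.mp hq
    rw [← hqb]
    exact eq_of_beq this.2

-- ===== VERDICT (by name: the statement is the Claim_ definition above) =====
theorem get_all_passes_times_spec : Claim_equal_get_all_passes_times := by
  intro rsl rel ssl sel _ hpre
  obtain ⟨-, -, hlen⟩ := hpre
  unfold Spec_get_all_passes_times get_all_passes_times get_all_passes_times_alt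
  simp only [PySem.List.foldl_prod_mk
      (f := fun acc k => acc ++ (PySem.Dict.ofList rsl).getD k [])
      (g := fun acc k => acc ++ (PySem.Dict.ofList rel).getD k []),
    PySem.List.foldl_prod_mk
      (f := fun acc k => acc ++ (PySem.Dict.ofList ssl).getD k [])
      (g := fun acc k => acc ++ (PySem.Dict.ofList sel).getD k []),
    PySem.List.foldl_append_eq_flatMap, List.nil_append]
  set starts := (PySem.Dict.ofList rsl).keys.flatMap (fun k => (PySem.Dict.ofList rsl).getD k [])
      ++ (PySem.Dict.ofList ssl).keys.flatMap (fun k => (PySem.Dict.ofList ssl).getD k []) with hstarts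
  set ends := (PySem.Dict.ofList rsl).keys.flatMap (fun k => (PySem.Dict.ofList rel).getD k [])
      ++ (PySem.Dict.ofList ssl).keys.flatMap (fun k => (PySem.Dict.ofList sel).getD k []) with hends
  have hlen' : starts.length ≤ ends.length := by
    simp only [hstarts, hends, List.length_append, List.length_flatMap]
    exact hlen
  -- name the zipped pair list, the bucket dict and the sorted distinct keys
  set pairs := starts.zip ends with hpairs
  set buckets := pairs.foldl (fun d p => d.modify p.1 [] (fun l => l ++ [p.2])) PySem.Dict.empty
    with hbuckets
  have hget : ∀ s, buckets.getD s [] = (pairs.filter (fun p => p.1 == s)).map (fun p => p.2) := by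
    intro s
    rw [hbuckets, PySem.Dict.getD_foldl_modify_append, PySem.Dict.getD_empty, List.nil_append]
  have hkeys : buckets.keys = PySem.Set.ofList (pairs.map (fun p => p.1)) := by
    rw [hbuckets, PySem.Dict.keys_foldl_modify_key]
    simp [PySem.Set.update_eq_append_filter]
  set ks := PySem.List.sorted (PySem.Set.ofList (pairs.map (fun p => p.1))) (fun s => s) false
    with hks
  have hks_sorted : ks.Pairwise (· < ·) := PySem.List.sorted_ofList_pairwise_lt _
  have hks_mem : ∀ p ∈ pairs, p.1 ∈ ks := by
    intro p hp
    rw [hks, PySem.List.mem_sorted, PySem.Set.mem_ofList]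
    exact List.mem_map_of_mem hp
  -- A's sorted index gather = the stably sorted pair list, componentwise
  have hzip : (PySem.List.pyRange 0 (PySem.List.len starts) 1).map
      (fun i => (PySem.List.pyGetD starts i 0, PySem.List.pyGetD ends i 0)) = pairs :=
    pv_range_map_zip starts ends hlen'
  have hsm := pv_sorted_map (fun i => (PySem.List.pyGetD starts i 0, PySem.List.pyGetD ends i 0))
      (fun p : Int × Int => p.1) (PySem.List.pyRange 0 (PySem.List.len starts) 1)
  rw [hzip] at hsm
  -- the stable sort, as blocks over the sorted distinct keys
  have hS : PySem.List.sorted pairs (fun p : Int × Int => p.1) false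
      = ks.flatMap (fun s => pairs.filter (fun p => p.1 == s)) :=
    pv_sorted_eq_flatMap pairs ks hks_sorted hks_mem
  -- rewrite B's output loop into its two flatMaps
  rw [PySem.List.foldl_prod_mk
      (f := fun (acc : List Int) s => acc ++ List.replicate (buckets.getD s []).length s)
      (g := fun (acc : List Int) s => acc ++ buckets.getD s []),
    PySem.List.foldl_append_eq_flatMap, PySem.List.foldl_append_eq_flatMap, List.nil_append,
    List.nil_append, hkeys, ← hks]
  -- compare componentwise
  refine Prod.ext ?_ ?_
  · show (PySem.List.sorted _ _ false).map (fun i => PySem.List.pyGetD starts i 0)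
      = ks.flatMap (fun s => List.replicate (buckets.getD s []).length s)
    have : (PySem.List.sorted (PySem.List.pyRange 0 (PySem.List.len starts) 1)
        (fun i => PySem.List.pyGetD starts i 0) false).map (fun i => PySem.List.pyGetD starts i 0)
        = (PySem.List.sorted pairs (fun p : Int × Int => p.1) false).map (fun p => p.1) := by
      rw [hsm, List.map_map]; rfl
    rw [this, hS, List.map_flatMap]
    simp only [List.flatMap_def]
    congr 1
    apply List.map_congr_left
    intro s _
    have h := pv_filter_map_fst_eq_replicate pairs s
    rw [List.length_map] at h
    rw [hget s, List.length_map]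
    exact h
  · show (PySem.List.sorted _ _ false).map (fun i => PySem.List.pyGetD ends i 0)
      = ks.flatMap (fun s => buckets.getD s [])
    have : (PySem.List.sorted (PySem.List.pyRange 0 (PySem.List.len starts) 1)
        (fun i => PySem.List.pyGetD starts i 0) false).map (fun i => PySem.List.pyGetD ends i 0)
        = (PySem.List.sorted pairs (fun p : Int × Int => p.1) false).map (fun p => p.2) := by
      rw [hsm, List.map_map]; rfl
    rw [this, hS, List.map_flatMap]
    simp only [List.flatMap_def]
    congr 1
    apply List.map_congr_left
    intro s _
    rw [hget s]
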